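-- pv_equiv track=rewrite | github.com/babyblueviper1/Viper-Stack-Omega | ordinals/ordinals.py | bech32_polymod
-- ===== SOURCE A (Python) =====
-- def bech32_polymod(values):
--     GEN = [0x3b6a57b2, 0x26508e6d, 0x1ea119fa, 0x3d4233dd, 0x2a1462b3]
--     chk = 1
--     for v in values:
--         b = (chk >> 25)
--         chk = (chk & 0x1ffffff) << 5 ^ v
--         for i in range(5):
--             chk ^= GEN[i] if ((b >> i) & 1) else 0
--     return chk
-- ===== SOURCE B (Python) =====
-- _GEN = [0x3b6a57b2, 0x26508e6d, 0x1ea119fa, 0x3d4233dd, 0x2a1462b3]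
--
-- # 32-entry table: _TABLE[b] = XOR of _GEN[i] over the set bits i of b (built once by doubling).
-- _TABLE = [0]
-- for _g in _GEN:
--     _TABLE += [_t ^ _g for _t in _TABLE]
--
--
-- def bech32_polymod(values):
--     chk = 1
--     for v in values:
--         chk = ((chk & 0x1ffffff) << 5) ^ v ^ _TABLE[(chk >> 25) & 31]
--     return chk
-- ===== Notes on version B (the rewrite author's own statement) =====
-- stated objective: faster
-- what changed: Replaced the per-value inner loop over the 5 generator constants by a 32-entry XOR lookup table precomputed once at module level (built by doubling), so the main loop is a single table-driven update per value with no inner loop.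
import Mathlib
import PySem

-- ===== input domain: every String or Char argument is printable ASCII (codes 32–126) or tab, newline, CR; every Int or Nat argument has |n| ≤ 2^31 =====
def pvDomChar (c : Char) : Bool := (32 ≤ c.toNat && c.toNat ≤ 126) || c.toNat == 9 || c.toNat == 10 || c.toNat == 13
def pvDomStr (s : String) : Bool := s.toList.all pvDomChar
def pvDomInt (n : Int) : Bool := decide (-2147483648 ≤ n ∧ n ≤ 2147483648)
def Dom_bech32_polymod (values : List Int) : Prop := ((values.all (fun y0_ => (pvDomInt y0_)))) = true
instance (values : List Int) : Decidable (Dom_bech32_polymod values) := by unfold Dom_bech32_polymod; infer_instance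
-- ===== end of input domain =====

-- B replaces A's per-value inner loop over the 5 generator constants by a 32-entry XOR table
-- precomputed once (table-driven polymod, the idiomatic form); same return value for every input.


-- ===== PORT A =====
-- literal transliteration of A; 'GEN[i]' and 'b >> i' are exact: i ranges over 0..4, in range for GEN
def bech32_polymod (values : List Int) : Int :=
  let GEN : List Int := [0x3b6a57b2, 0x26508e6d, 0x1ea119fa, 0x3d4233dd, 0x2a1462b3]
  values.foldl (fun (chk v : Int) =>
    let b : Int := chk >>> 25
    let chk1 : Int := PySem.Int.bxor ((PySem.Int.band chk 0x1ffffff) <<< 5) v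
    (PySem.List.pyRange 0 5 1).foldl
      (fun (c i : Int) =>
        PySem.Int.bxor c
          (if PySem.Int.band (b >>> i.toNat) 1 ≠ 0 then PySem.List.pyGetD GEN i 0 else 0))
      chk1) 1

-- ===== PORT B =====
def pvGEN : List Int := [0x3b6a57b2, 0x26508e6d, 0x1ea119fa, 0x3d4233dd, 0x2a1462b3]

-- module-level table of Source B: _TABLE[b] = XOR of pvGEN[i] over the set bits i of b
def pvTABLE : List Int :=
  pvGEN.foldl (fun T g => T ++ T.map (fun t => PySem.Int.bxor t g)) [0]

-- the index '(chk >> 25) & 31' is always in 0..31, in range for the 32-entry table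
def bech32_polymod_alt (values : List Int) : Int :=
  values.foldl (fun chk v =>
    PySem.Int.bxor (PySem.Int.bxor ((PySem.Int.band chk 0x1ffffff) <<< 5) v)
      (PySem.List.pyGetD pvTABLE (PySem.Int.band (chk >>> 25) 31) 0)) 1

-- ===== PRECONDITION & SPEC =====
def Spec_bech32_polymod (values : List Int) (out : Int) : Prop := out = bech32_polymod_alt values
instance (values : List Int) (out : Int) : Decidable (Spec_bech32_polymod values out) := by unfold Spec_bech32_polymod; infer_instance

-- ===== CLAIM (what is proved, stated in full; the proofs are below) =====
def Claim_equal_bech32_polymod : Prop := ∀ (values : List Int), Dom_bech32_polymod values → Spec_bech32_polymod values (bech32_polymod values)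

-- ===== LEMMAS AND PROOFS =====

theorem pv_bxor_np (m n : Nat) : PySem.Int.bxor (↑m) (-↑n - 1) = -↑(m ^^^ n) - 1 := by
  simp [PySem.Int.bxor]
  omega

theorem pv_bxor_pn (m n : Nat) : PySem.Int.bxor (-↑m - 1) (↑n) = -↑(m ^^^ n) - 1 := by
  simp [PySem.Int.bxor]
  omega

theorem pv_bxor_pp (m n : Nat) : PySem.Int.bxor (-↑m - 1) (-↑n - 1) = ↑(m ^^^ n) := by
  have h3 : ¬(1 ≤ -(m:Int)) := by omega
  have h4 : ¬(1 ≤ -(n:Int)) := by omega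
  simp [PySem.Int.bxor, h3, h4]

theorem pv_bxor_assoc (a b c : Int) :
    PySem.Int.bxor (PySem.Int.bxor a b) c = PySem.Int.bxor a (PySem.Int.bxor b c) := by
  have hns : ∀ x : Nat, Int.negSucc x = -(x:Int) - 1 := fun x => by
    rw [Int.negSucc_eq]; ring
  rcases a with m | m <;> rcases b with n | n <;> rcases c with k | k <;>
    simp only [Int.ofNat_eq_natCast, hns, PySem.Int.bxor_natCast,
      pv_bxor_np, pv_bxor_pn, pv_bxor_pp, Nat.xor_assoc]

theorem pv_band31 (b : Int) : PySem.Int.band b 31 = b % 32 := by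
  have hmod : ∀ n : Nat, n &&& 31 = n % 32 := by
    intro n; have := Nat.and_two_pow_sub_one_eq_mod n 5; norm_num at this; exact this
  by_cases h : 0 ≤ b
  · have : PySem.Int.band b 31 = ((b.toNat &&& (31:Int).toNat : Nat) : Int) := by
      simp [PySem.Int.band, h]
    rw [this]; rw [show (31:Int).toNat = 31 from rfl, hmod]; omega
  · have : PySem.Int.band b 31 = (((31:Int).toNat - ((31:Int).toNat &&& (-b-1).toNat) : Nat) : Int) := by
      simp [PySem.Int.band, h]
    rw [this, show (31:Int).toNat = 31 from rfl, Nat.and_comm, hmod]; omega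

theorem pv_bit (b : Int) (k : Nat) (hk : k < 5) :
    PySem.Int.band (b >>> k) 1 = (b % 32) / (2 ^ k : Nat) % 2 := by
  rw [PySem.Int.band_one, PySem.Int.mod_eq_emod_of_pos (by norm_num),
      Int.shiftRight_eq_div_pow]
  interval_cases k <;> push_cast <;> omega

theorem pv_table (c b : Int) :
    (PySem.List.pyRange 0 5 1).foldl
      (fun (x i : Int) =>
        PySem.Int.bxor x
          (if PySem.Int.band (b >>> i.toNat) 1 ≠ 0
           then PySem.List.pyGetD [(0x3b6a57b2:Int), 0x26508e6d, 0x1ea119fa, 0x3d4233dd, 0x2a1462b3] i 0 else 0))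
      c
    = PySem.Int.bxor c (PySem.List.pyGetD pvTABLE (PySem.Int.band b 31) 0) := by
  rw [show PySem.List.pyRange 0 5 1 = [0, 1, 2, 3, 4] from by decide]
  simp only [List.foldl]
  rw [pv_band31 b]
  have h0 := pv_bit b 0 (by norm_num)
  have h1 := pv_bit b 1 (by norm_num)
  have h2 := pv_bit b 2 (by norm_num)
  have h3 := pv_bit b 3 (by norm_num)
  have h4 := pv_bit b 4 (by norm_num)
  norm_num only at h0 h1 h2 h3 h4
  simp only [show Int.toNat 0 = 0 from rfl, show Int.toNat 1 = 1 from rfl,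
    show Int.toNat 2 = 2 from rfl, show Int.toNat 3 = 3 from rfl,
    show Int.toNat 4 = 4 from rfl]
  simp only [h0, h1, h2, h3, h4]
  have hr0 : 0 ≤ b % 32 := by omega
  have hr32 : b % 32 < 32 := by omega
  generalize b % 32 = r at hr0 hr32 ⊢
  interval_cases r <;>
    norm_num <;>
    (try simp only [pv_bxor_assoc]) <;>
    (first | rfl
           | (rw [show PySem.List.pyGetD pvTABLE 0 0 = (0:Int) from by decide]; simp))

theorem pv_fold (values : List Int) (c : Int) :
    values.foldl (fun (chk v : Int) =>
      (PySem.List.pyRange 0 5 1).foldl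
        (fun (x i : Int) =>
          PySem.Int.bxor x
            (if PySem.Int.band ((chk >>> 25) >>> i.toNat) 1 ≠ 0
             then PySem.List.pyGetD [(0x3b6a57b2:Int), 0x26508e6d, 0x1ea119fa, 0x3d4233dd, 0x2a1462b3] i 0 else 0))
        (PySem.Int.bxor ((PySem.Int.band chk 0x1ffffff) <<< 5) v)) c
    = values.foldl (fun chk v =>
        PySem.Int.bxor (PySem.Int.bxor ((PySem.Int.band chk 0x1ffffff) <<< 5) v)
          (PySem.List.pyGetD pvTABLE (PySem.Int.band (chk >>> 25) 31) 0)) c := by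
  induction values generalizing c with
  | nil => rfl
  | cons v vs ih =>
    simp only [List.foldl]
    rw [pv_table]
    exact ih _

-- ===== VERDICT (by name: the statement is the Claim_ definition above) =====
theorem bech32_polymod_spec : Claim_equal_bech32_polymod := by
  intro values _
  unfold Spec_bech32_polymod bech32_polymod bech32_polymod_alt
  have h := pv_fold values 1
  exact h
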